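-- pv_equiv track=rewrite | github.com/3duardoambrosio-bit/trendify-f1 | scripts/build_canonical_from_dropi.py | _slug_ascii
-- ===== SOURCE A (Python) =====
-- import unicodedata
--
-- def _slug_ascii(s: str) -> str:
--     s = (s or "").strip()
--     if not s:
--         return "product"
--     # NFKD -> drop diacritics -> ascii
--     s2 = unicodedata.normalize("NFKD", s)
--     s2 = s2.encode("ascii", "ignore").decode("ascii")
--     # keep alnum, turn others into '-'
--     out = []
--     for ch in s2.lower():
--         out.append(ch if ch.isalnum() else "-")
--     slug = "".join(out)
--     while "--" in slug:
--         slug = slug.replace("--", "-")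
--     slug = slug.strip("-")
--     return slug or "product"
-- ===== SOURCE B (Python) =====
-- import unicodedata
--
-- def _slug_ascii(s: str) -> str:
--     # One pass: split into maximal alnum runs, join with single dashes.
--     s = (s or "").strip()
--     if not s:
--         return "product"
--     s2 = unicodedata.normalize("NFKD", s)
--     s2 = s2.encode("ascii", "ignore").decode("ascii").lower()
--     parts = []
--     run = []
--     for ch in s2:
--         if ch.isalnum():
--             run.append(ch)
--         elif run:
--             parts.append("".join(run))
--             run = []
--     if run:
--         parts.append("".join(run))
--     return "-".join(parts) or "product"
-- ===== Notes on version B (the rewrite author's own statement) =====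
-- stated objective: idiomatic
-- what changed: Replaces the per-character mask pass, the repeated double-dash collapse replace loop and the final dash strip by a single pass that collects maximal alphanumeric runs and joins them with single dashes.
import Mathlib
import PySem

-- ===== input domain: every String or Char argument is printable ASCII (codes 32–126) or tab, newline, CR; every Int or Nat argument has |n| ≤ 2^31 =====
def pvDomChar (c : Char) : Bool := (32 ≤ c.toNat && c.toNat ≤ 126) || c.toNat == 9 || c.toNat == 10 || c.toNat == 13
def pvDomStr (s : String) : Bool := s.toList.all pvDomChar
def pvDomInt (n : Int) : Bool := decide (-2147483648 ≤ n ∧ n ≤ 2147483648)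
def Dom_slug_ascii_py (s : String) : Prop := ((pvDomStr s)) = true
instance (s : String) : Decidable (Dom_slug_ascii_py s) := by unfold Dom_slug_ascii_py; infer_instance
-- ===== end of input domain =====

-- B replaces A's per-character mask pass, the repeated "--"->"-" replace loop and the final
-- strip("-") by one pass that joins the maximal alphanumeric runs with "-" (objective: idiomatic);
-- equal on the ASCII domain, where NFKD normalization and the ascii encode/decode round-trip are
-- the identity and are ported as such.

-- ===== PORT A =====
-- the `while "--" in slug: slug = slug.replace("--", "-")` loop; the fuel argument only makes the
-- same computation total (it is at least the list length, and each replace with "--" present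
-- strictly shortens the list, as proved below)
def awhileA : Nat → List Char → List Char
  | 0, slug => slug
  | (fuel+1), slug =>
    if PySem.Chars.isIn ['-', '-'] slug then
      awhileA fuel (PySem.Chars.replace slug ['-', '-'] ['-'])
    else slug

def slug_ascii_py (s : String) : String :=
  -- s = (s or "").strip(); `s or ""` is the identity on the returned string
  let s1 := PySem.Str.strip s
  if PySem.Str.len s1 = 0 then "product"
  else
    -- NFKD normalization and ascii encode/decode: identity on the ASCII domain, ported as identity
    let s2 := s1
    -- for ch in s2.lower(): out.append(ch if ch.isalnum() else "-")
    let out : List Char :=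
      (PySem.Chars.lower s2.toList).foldl
        (fun acc ch => acc ++ [if PySem.Chars.isalnum ch then ch else '-']) []
    let slug := awhileA out.length out
    let slug2 := PySem.Chars.stripChars slug ['-']
    if slug2.isEmpty then "product" else String.ofList slug2

-- ===== PORT B =====
-- the single pass of Source B: state (parts, run); a non-alnum char flushes a nonempty run
def bLoop : List Char → List (List Char) → List Char → List (List Char)
  | [], parts, run => if run.isEmpty then parts else parts ++ [run]
  | c :: t, parts, run =>
    if PySem.Chars.isalnum c then bLoop t parts (run ++ [c])
    else if run.isEmpty then bLoop t parts []
    else bLoop t (parts ++ [run]) []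

def slug_ascii_py_alt (s : String) : String :=
  let s1 := PySem.Str.strip s
  if PySem.Str.len s1 = 0 then "product"
  else
    -- NFKD normalization and ascii encode/decode: identity on the ASCII domain, ported as identity
    let s2 := PySem.Chars.lower s1.toList
    let parts := bLoop s2 [] []
    let j := PySem.Chars.join ['-'] parts
    if j.isEmpty then "product" else String.ofList j

-- ===== PRECONDITION & SPEC =====
def Spec_slug_ascii_py (s : String) (out : String) : Prop := out = slug_ascii_py_alt s
instance (s : String) (out : String) : Decidable (Spec_slug_ascii_py s out) := by unfold Spec_slug_ascii_py; infer_instance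

-- ===== CLAIM (what is proved, stated in full; the proofs are below) =====
def Claim_equal_slug_ascii_py : Prop := ∀ (s : String), Dom_slug_ascii_py s → Spec_slug_ascii_py s (slug_ascii_py s)

-- ===== LEMMAS AND PROOFS =====
def rep1 : List Char → List Char
  | [] => []
  | [c] => [c]
  | a :: b :: t => if a = '-' ∧ b = '-' then '-' :: rep1 t else a :: rep1 (b :: t)

theorem rep1_le (l : List Char) : (rep1 l).length ≤ l.length := by
  fun_induction rep1 l <;> simp_all <;> omega

theorem go_eq_rep1 : ∀ fuel (l acc : List Char), l.length ≤ fuel →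
    PySem.Chars.replace.go ['-','-'] ['-'] fuel l acc = acc.reverse ++ rep1 l := by
  intro fuel
  induction fuel with
  | zero => intro l acc h; simp at h; subst h; simp [PySem.Chars.replace.go, rep1]
  | succ n ih =>
    intro l acc h
    match l with
    | [] => simp [PySem.Chars.replace.go, rep1]
    | [c] =>
      rw [PySem.Chars.replace.go]
      have : List.isPrefixOf ['-','-'] [c] = false := by simp [List.isPrefixOf]
      simp [this, rep1, ih [] (c :: acc) (by simp)]
    | a :: b :: t =>
      rw [PySem.Chars.replace.go]
      by_cases hab : a = '-' ∧ b = '-'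
      · obtain ⟨ha, hb⟩ := hab; subst ha; subst hb
        have hp : List.isPrefixOf ['-','-'] ('-' :: '-' :: t) = true := by simp [List.isPrefixOf]
        simp only [hp, if_true, List.length_cons, List.drop_succ_cons, List.drop_zero,
          List.reverse_cons, List.reverse_nil, List.nil_append, List.length_nil, List.length_singleton]
        rw [ih t (['-'] ++ acc) (by simp at h ⊢; omega)]
        simp [rep1]
      · have hp : List.isPrefixOf ['-','-'] (a :: b :: t) = false := by
          simp [List.isPrefixOf]; intro ha hb; exact hab ⟨ha.symm, hb.symm⟩
        simp only [hp, Bool.false_eq_true, if_false]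
        rw [ih (b :: t) (a :: acc) (by simp at h ⊢; omega)]
        simp [rep1, hab]

theorem replace_eq_rep1 (l : List Char) :
    PySem.Chars.replace l ['-','-'] ['-'] = rep1 l := by
  rw [PySem.Chars.replace]
  simp only [List.isEmpty_cons, if_false]
  simpa using go_eq_rep1 l.length l [] le_rfl

def dd : List Char → List Char
  | [] => []
  | [c] => [c]
  | a :: b :: t => if a = '-' ∧ b = '-' then dd (b :: t) else a :: dd (b :: t)

theorem rep1_cons (a : Char) (z : List Char) : ∃ w, rep1 (a :: z) = a :: w := by
  match z with
  | [] => exact ⟨[], rfl⟩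
  | b :: t =>
    rw [rep1]
    by_cases hab : a = '-' ∧ b = '-'
    · exact ⟨rep1 t, by simp [hab, hab.1]⟩
    · exact ⟨rep1 (b :: t), by simp [hab]⟩

theorem rep1_lt (l : List Char) (h : ['-','-'] <:+: l) : (rep1 l).length < l.length := by
  fun_induction rep1 l with
  | case1 => simp at h
  | case2 c =>
    exfalso
    have := h.length_le; simp at this
  | case3 a b t hab ih =>
    obtain ⟨ha, hb⟩ := hab; subst ha; subst hb
    have := rep1_le t
    simp; omega
  | case4 a b t hab ih =>
    have hbt : ['-','-'] <:+: (b :: t) := by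
      rcases (List.infix_cons_iff.mp h) with hpre | htail
      · exfalso
        rcases hpre with ⟨r, hr⟩
        simp at hr
        exact hab ⟨hr.1.symm, hr.2.1.symm⟩
      · exact htail
    have := ih hbt
    simp at this ⊢; omega

theorem dd_eq_self (l : List Char) (h : ¬ (['-','-'] <:+: l)) : dd l = l := by
  fun_induction dd l with
  | case1 => rfl
  | case2 c => rfl
  | case3 a b t hab ih =>
    exfalso
    apply h
    obtain ⟨ha, hb⟩ := hab; subst ha; subst hb
    exact ⟨[], t, rfl⟩
  | case4 a b t hab ih =>
    rw [ih (fun hc => h (List.infix_cons_iff.mpr (Or.inr hc)))]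

theorem rep1_head? (t : List Char) : (rep1 t).head? = t.head? := by
  match t with
  | [] => rfl
  | a :: z => obtain ⟨w, hw⟩ := rep1_cons a z; rw [hw]; simp

theorem dd_dash_cons_eq (x y : List Char) (hh : x.head? = y.head?) (hdd : dd x = dd y) :
    dd ('-' :: x) = dd ('-' :: y) := by
  match x, y with
  | [], [] => rfl
  | [], b :: y' => simp at hh
  | a :: x', [] => simp at hh
  | a :: x', b :: y' =>
    simp at hh; subst hh
    by_cases hb : a = '-'
    · subst hb
      rw [show dd ('-'::'-'::x') = dd ('-'::x') from by rw [dd]; simp,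
          show dd ('-'::'-'::y') = dd ('-'::y') from by rw [dd]; simp]
      exact hdd
    · rw [show dd ('-'::a::x') = '-' :: dd (a::x') from by rw [dd]; simp [hb],
          show dd ('-'::a::y') = '-' :: dd (a::y') from by rw [dd]; simp [hb]]
      rw [hdd]

theorem dd_rep1 (l : List Char) : dd (rep1 l) = dd l := by
  have H : ∀ n (l : List Char), l.length ≤ n → dd (rep1 l) = dd l := by
    intro n
    induction n with
    | zero => intro l h; simp at h; subst h; rfl
    | succ n ih =>
      intro l h
      match l with
      | [] => rfl
      | [c] => rfl
      | a :: b :: t =>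
        rw [rep1]
        by_cases hab : a = '-' ∧ b = '-'
        · obtain ⟨ha, hb⟩ := hab; subst ha; subst hb
          rw [if_pos ⟨rfl, rfl⟩]
          rw [show dd ('-'::'-'::t) = dd ('-'::t) from by rw [dd]; simp]
          exact dd_dash_cons_eq _ _ (rep1_head? t) (ih t (by simp at h ⊢; omega))
        · rw [if_neg hab]
          obtain ⟨w, hw⟩ := rep1_cons b t
          rw [hw]
          rw [show dd (a :: b :: w) = a :: dd (b :: w) from by rw [dd]; simp [hab],
              show dd (a :: b :: t) = a :: dd (b :: t) from by rw [dd]; simp [hab]]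
          rw [← hw, ih (b :: t) (by simp at h ⊢; omega)]
  exact H l.length l le_rfl
theorem awhileA_eq_dd : ∀ fuel (l : List Char), l.length ≤ fuel → awhileA fuel l = dd l := by
  intro fuel
  induction fuel with
  | zero => intro l h; simp at h; subst h; rfl
  | succ n ih =>
    intro l h
    rw [awhileA]
    by_cases hin : PySem.Chars.isIn ['-','-'] l = true
    · have hinf := (PySem.Chars.isIn_iff_infix _ _).mp hin
      rw [if_pos hin, replace_eq_rep1]
      have hlt := rep1_lt l hinf
      rw [ih (rep1 l) (by omega)]
      exact dd_rep1 l
    · rw [if_neg hin]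
      exact (dd_eq_self l ((PySem.Chars.isIn_eq_false_iff _ _).mp (by simpa using hin))).symm

def pD : Char → Bool := fun c => List.contains ['-'] c
def ldw (x : List Char) : List Char := x.dropWhile pD
def rdw (x : List Char) : List Char := (x.reverse.dropWhile pD).reverse
def sdd (x : List Char) : List Char := rdw (ldw x)

theorem stripChars_eq_sdd (x : List Char) : PySem.Chars.stripChars x ['-'] = sdd x := rfl

def maskc (ch : Char) : Char := if PySem.Chars.isalnum ch then ch else '-'

theorem alnum_pD (c : Char) (h : PySem.Chars.isalnum c = true) : pD c = false := by
  have hd : PySem.Chars.isalnum '-' = false := by decide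
  simp [pD]
  intro hc
  subst hc
  rw [hd] at h
  exact Bool.false_ne_true h

theorem alnum_ne_dash (c : Char) (h : PySem.Chars.isalnum c = true) : c ≠ '-' := by
  intro hc
  have := alnum_pD c h
  rw [hc] at this
  simp [pD] at this

def runs : List Char → List (List Char)
  | [] => []
  | c :: t =>
    if PySem.Chars.isalnum c then
      (c :: t.takeWhile PySem.Chars.isalnum) :: runs (t.dropWhile PySem.Chars.isalnum)
    else runs t
termination_by l => l.length
decreasing_by
  · have := List.length_dropWhile_le PySem.Chars.isalnum t; simp; omega
  · simp

def jr : List (List Char) → List Char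
  | [] => []
  | [r] => r
  | r :: rs => r ++ '-' :: jr rs

theorem dd_alnum_prefix (r y : List Char) (h : ∀ c ∈ r, c ≠ '-') :
    dd (r ++ y) = r ++ dd y := by
  induction r with
  | nil => simp
  | cons a r' ih =>
    have ha : a ≠ '-' := h a (by simp)
    have ih' := ih (fun c hc => h c (by simp [hc]))
    match hz : r' ++ y with
    | [] =>
      have hr : r' = [] := by cases r' <;> simp_all
      have hy : y = [] := by cases y <;> simp_all
      subst hr; subst hy; rfl
    | b :: z =>
      rw [List.cons_append, hz,
          show dd (a :: b :: z) = a :: dd (b :: z) from by rw [dd]; simp [ha],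
          ← hz, ih']
      simp

theorem dd_cons_of (a b : Char) (t : List Char) (h : ¬(a = '-' ∧ b = '-')) :
    dd (a :: b :: t) = a :: dd (b :: t) := by rw [dd]; simp [h]

theorem dd_dd (t : List Char) : dd ('-' :: '-' :: t) = dd ('-' :: t) := by rw [dd]; simp

theorem ldw_dash (y : List Char) : ldw ('-' :: y) = ldw y := by
  simp [ldw, List.dropWhile_cons, pD]

theorem dropWhile_all (l : List Char) (h : ∀ c ∈ l, pD c = false) : l.dropWhile pD = l := by
  cases l with
  | nil => rfl
  | cons a l' => simp [List.dropWhile_cons, h a (by simp)]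

theorem rdw_append' (r y : List Char) (hc : r.reverse.dropWhile pD = r.reverse) :
    rdw (r ++ y) = r ++ rdw y := by
  simp only [rdw, List.reverse_append, List.dropWhile_append]
  by_cases he : (y.reverse.dropWhile pD).isEmpty
  · rw [if_pos he, hc]
    have : y.reverse.dropWhile pD = [] := by simpa [List.isEmpty_iff] using he
    simp [this]
  · rw [if_neg he]
    simp

theorem revdrop_all (r : List Char) (hall : ∀ c ∈ r, pD c = false) :
    r.reverse.dropWhile pD = r.reverse :=
  dropWhile_all _ (fun c hc => hall c (List.mem_reverse.mp hc))

theorem revdrop_dashcons (r : List Char) (hr : r ≠ []) (hall : ∀ c ∈ r, pD c = false) :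
    ('-' :: r).reverse.dropWhile pD = ('-' :: r).reverse := by
  have h1 : r.reverse.dropWhile pD = r.reverse := revdrop_all r hall
  have h2 : ¬ (r.reverse.dropWhile pD).isEmpty := by
    rw [h1]; simpa [List.isEmpty_iff] using hr
  simp only [List.reverse_cons, List.dropWhile_append, if_neg h2]
  rw [h1]

theorem sdd_dash_cons (y : List Char) : sdd ('-' :: y) = sdd y := by
  simp [sdd, ldw_dash]

theorem sdd_prefix (r y : List Char) (hr : r ≠ []) (hall : ∀ c ∈ r, pD c = false) :
    sdd (r ++ y) = r ++ rdw y := by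
  match r with
  | a :: r' =>
    have : ldw ((a :: r') ++ y) = (a :: r') ++ y := by
      simp [ldw, List.dropWhile_cons, hall a (by simp)]
    rw [sdd, this, rdw_append' _ _ (revdrop_all _ hall)]

theorem sdd_dd_dash (x : List Char) : sdd (dd ('-' :: x)) = sdd (dd x) := by
  match x with
  | [] => rfl
  | b :: z =>
    by_cases hb : b = '-'
    · subst hb; rw [dd_dd]
    · rw [dd_cons_of _ _ _ (by simp [hb]), sdd_dash_cons]

theorem head_dropWhile (p : Char → Bool) (l : List Char) :
    ∀ {a : Char} {t : List Char}, l.dropWhile p = a :: t → p a = false := by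
  induction l with
  | nil => intro a t h; simp at h
  | cons b l' ih =>
    intro a t h
    rw [List.dropWhile_cons] at h
    by_cases hb : p b
    · rw [if_pos hb] at h; exact ih h
    · rw [if_neg hb] at h
      cases h
      simpa using hb

theorem mask_alnum_run (c : Char) (tw : List Char) (hc : PySem.Chars.isalnum c = true)
    (htw : ∀ x ∈ tw, PySem.Chars.isalnum x = true) :
    (c :: tw).map maskc = c :: tw := by
  have : ∀ x ∈ c :: tw, maskc x = x := by
    intro x hx
    rcases List.mem_cons.mp hx with hx | hx
    · subst hx; simp [maskc, hc]
    · simp [maskc, htw x hx]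
  calc (c :: tw).map maskc = (c :: tw).map id := List.map_congr_left this
    _ = c :: tw := by simp

theorem PQ : ∀ n (m : List Char), m.length ≤ n →
    (sdd (dd (m.map maskc)) = jr (runs m)) ∧
    (rdw (dd ('-' :: m.map maskc)) = if runs m = [] then [] else '-' :: jr (runs m)) := by
  intro n
  induction n with
  | zero =>
    intro m h; simp at h; subst h
    refine ⟨by simp [runs, jr]; decide, by simp [runs]; decide⟩
  | succ n ih =>
    intro m h
    match m with
    | [] => refine ⟨by simp [runs, jr]; decide, by simp [runs]; decide⟩
    | c :: t =>
      by_cases hc : PySem.Chars.isalnum c = true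
      · -- alnum head: run r = c :: takeWhile, rest = dropWhile
        have htw : ∀ x ∈ t.takeWhile PySem.Chars.isalnum, PySem.Chars.isalnum x = true :=
          fun x hx => List.mem_takeWhile_imp hx
        have hall : ∀ x ∈ c :: t.takeWhile PySem.Chars.isalnum, pD x = false := by
          intro x hx
          rcases List.mem_cons.mp hx with hx | hx
          · subst hx; exact alnum_pD _ hc
          · exact alnum_pD _ (htw x hx)
        have hne : ∀ x ∈ c :: t.takeWhile PySem.Chars.isalnum, x ≠ '-' := by
          intro x hx
          rcases List.mem_cons.mp hx with hx | hx
          · subst hx; exact alnum_ne_dash _ hc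
          · exact alnum_ne_dash _ (htw x hx)
        have htw_map : (t.takeWhile PySem.Chars.isalnum).map maskc
            = t.takeWhile PySem.Chars.isalnum := by
          have h0 := mask_alnum_run c _ hc htw
          simp only [List.map_cons, List.cons.injEq] at h0
          exact h0.2
        have hmc : maskc c = c := by simp [maskc, hc]
        have hmap : (c :: t).map maskc
            = (c :: t.takeWhile PySem.Chars.isalnum)
              ++ (t.dropWhile PySem.Chars.isalnum).map maskc := by
          conv_lhs => rw [← List.takeWhile_append_dropWhile (p := PySem.Chars.isalnum) (l := t)]
          simp only [List.map_cons, List.map_append, htw_map, hmc, List.cons_append]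
        have hruns : runs (c :: t)
            = (c :: t.takeWhile PySem.Chars.isalnum) :: runs (t.dropWhile PySem.Chars.isalnum) := by
          rw [runs, if_pos hc]
        have hrestlen : (t.dropWhile PySem.Chars.isalnum).length ≤ t.length :=
          List.length_dropWhile_le _ _
        have htlen : t.length ≤ n := by simp at h; omega
        constructor
        · -- P
          rw [hmap, dd_alnum_prefix _ _ hne, sdd_prefix _ _ (by simp) hall, hruns]
          match hrest : t.dropWhile PySem.Chars.isalnum with
          | [] => simp [runs, jr, rdw, dd]
          | d :: t' =>
            have hd : PySem.Chars.isalnum d = false := head_dropWhile _ t hrest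
            have ht'len : t'.length ≤ n := by
              have := hrestlen; rw [hrest] at this; simp at this; omega
            have hrt : runs (d :: t') = runs t' := by rw [runs]; simp [hd]
            rw [show (d :: t').map maskc = '-' :: t'.map maskc from by simp [maskc, hd],
                (ih t' ht'len).2, hrt]
            cases hq : runs t' with
            | nil => simp [jr]
            | cons q qs => simp [jr]
        · -- Q
          rw [hmap, hruns]
          simp only [List.cons_append]
          rw [dd_cons_of '-' c _ (by
            intro hcd
            exact absurd hcd.2 (alnum_ne_dash _ hc))]
          rw [← List.cons_append (a := c), dd_alnum_prefix _ _ hne]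
          rw [show ('-' :: ((c :: t.takeWhile PySem.Chars.isalnum)
                ++ dd ((t.dropWhile PySem.Chars.isalnum).map maskc)))
              = ('-' :: c :: t.takeWhile PySem.Chars.isalnum)
                ++ dd ((t.dropWhile PySem.Chars.isalnum).map maskc) from by simp]
          rw [rdw_append' _ _ (revdrop_dashcons _ (by simp) hall)]
          match hrest : t.dropWhile PySem.Chars.isalnum with
          | [] => simp [runs, jr, rdw, dd]
          | d :: t' =>
            have hd : PySem.Chars.isalnum d = false := head_dropWhile _ t hrest
            have ht'len : t'.length ≤ n := by
              have := hrestlen; rw [hrest] at this; simp at this; omega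
            have hrt : runs (d :: t') = runs t' := by rw [runs]; simp [hd]
            rw [show (d :: t').map maskc = '-' :: t'.map maskc from by simp [maskc, hd],
                (ih t' ht'len).2, hrt]
            cases hq : runs t' with
            | nil => simp [jr]
            | cons q qs => simp [jr]
      · -- non-alnum head
        have hmap : (c :: t).map maskc = '-' :: t.map maskc := by
          simp [maskc, hc]
        have hruns : runs (c :: t) = runs t := by rw [runs]; simp [hc]
        have htlen : t.length ≤ n := by simp at h; omega
        constructor
        · rw [hmap, sdd_dd_dash, hruns]
          exact (ih t htlen).1
        · rw [hmap, dd_dd, hruns]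
          exact (ih t htlen).2
def runsA : List Char → List Char → List (List Char)
  | [], run => if run.isEmpty then [] else [run]
  | c :: t, run =>
    if PySem.Chars.isalnum c then runsA t (run ++ [c])
    else if run.isEmpty then runsA t []
    else run :: runsA t []

theorem bLoop_eq : ∀ (m : List Char) (parts : List (List Char)) (run : List Char),
    bLoop m parts run = parts ++ runsA m run := by
  intro m
  induction m with
  | nil => intro parts run; rw [bLoop, runsA]; split <;> simp
  | cons c t ih =>
    intro parts run
    rw [bLoop, runsA]
    by_cases hc : PySem.Chars.isalnum c = true
    · rw [if_pos hc, if_pos hc, ih]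
    · rw [if_neg hc, if_neg hc]
      by_cases hr : run.isEmpty
      · rw [if_pos hr, if_pos hr, ih]
      · rw [if_neg hr, if_neg hr, ih]
        simp

theorem runsA_pending : ∀ (t run : List Char), run ≠ [] →
    runsA t run = (run ++ t.takeWhile PySem.Chars.isalnum) :: runsA (t.dropWhile PySem.Chars.isalnum) [] := by
  intro t
  induction t with
  | nil => intro run hr; simp [runsA, List.isEmpty_iff, hr]
  | cons c t' ih =>
    intro run hr
    rw [runsA]
    by_cases hc : PySem.Chars.isalnum c = true
    · rw [if_pos hc, ih (run ++ [c]) (by simp), List.takeWhile_cons_of_pos hc,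
          List.dropWhile_cons_of_pos hc]
      simp
    · rw [if_neg hc, if_neg (by simpa [List.isEmpty_iff] using hr),
          List.takeWhile_cons_of_neg (by simpa using hc),
          List.dropWhile_cons_of_neg (by simpa using hc)]
      simp [runsA, hc]

theorem runsA_nil_eq_runs (t : List Char) : runsA t [] = runs t := by
  have H : ∀ n (t : List Char), t.length ≤ n → runsA t [] = runs t := by
    intro n
    induction n with
    | zero => intro t h; simp at h; subst h; simp [runsA, runs]
    | succ n ih =>
      intro t h
      match t with
      | [] => simp [runsA, runs]
      | c :: t' =>
        rw [runsA, runs]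
        by_cases hc : PySem.Chars.isalnum c = true
        · rw [if_pos hc, if_pos hc]
          simp only [List.nil_append]
          rw [runsA_pending t' [c] (by simp)]
          simp only [List.nil_append, List.cons_append]
          rw [ih (t'.dropWhile PySem.Chars.isalnum)
              (by have := List.length_dropWhile_le PySem.Chars.isalnum t'; simp at h; omega)]
        · rw [if_neg hc, if_pos (by simp), if_neg hc]
          exact ih t' (by simp at h; omega)
  exact H t.length t le_rfl

theorem join_eq_jr (l : List (List Char)) : PySem.Chars.join ['-'] l = jr l := by
  induction l with
  | nil => rfl
  | cons r rs ih =>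
    match rs with
    | [] => simp [PySem.Chars.join, List.intercalate, jr]
    | q :: qs =>
      rw [show jr (r :: q :: qs) = r ++ '-' :: jr (q :: qs) from rfl, ← ih]
      simp [PySem.Chars.join, List.intercalate, List.intersperse]

theorem foldl_mask : ∀ (l acc : List Char),
    l.foldl (fun acc ch => acc ++ [if PySem.Chars.isalnum ch then ch else '-']) acc
      = acc ++ l.map maskc := by
  intro l
  induction l with
  | nil => intro acc; simp
  | cons c t ih => intro acc; rw [List.foldl_cons, ih]; simp [maskc]
theorem key_eq (m : List Char) :
    PySem.Chars.stripChars
        (awhileA ((m.foldl (fun acc ch => acc ++ [if PySem.Chars.isalnum ch then ch else '-']) []).length)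
          (m.foldl (fun acc ch => acc ++ [if PySem.Chars.isalnum ch then ch else '-']) [])) ['-']
      = PySem.Chars.join ['-'] (bLoop m [] []) := by
  rw [foldl_mask m [], List.nil_append, awhileA_eq_dd _ _ le_rfl, stripChars_eq_sdd,
      (PQ m.length m le_rfl).1, bLoop_eq, List.nil_append, runsA_nil_eq_runs, join_eq_jr]

theorem ports_agree (s : String) : slug_ascii_py s = slug_ascii_py_alt s := by
  rw [slug_ascii_py, slug_ascii_py_alt]
  by_cases h0 : PySem.Str.len (PySem.Str.strip s) = 0
  · simp only [h0, if_true]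
  · simp only [h0, if_false]
    rw [key_eq]

-- ===== VERDICT (by name: the statement is the Claim_ definition above) =====
theorem slug_ascii_py_spec : Claim_equal_slug_ascii_py := by
  intro s _
  exact ports_agree s
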